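-- pv_equiv track=rewrite | github.com/OpenABL/OpenABL | bench/plot_dmason.py | ordered_items
-- ===== SOURCE A (Python) =====
-- def ordered_items(dictionary, key_order):
--     dict_copy = dictionary.copy()
--     for key in key_order:
--         if key in dict_copy:
--             yield key, dict_copy[key]
--             del dict_copy[key]
--     for key, value in dict_copy.items():
--         yield key, value
-- ===== SOURCE B (Python) =====
-- def ordered_items(dictionary, key_order):
--     n = len(key_order)
--     rank = {}
--     for i, key in enumerate(key_order):
--         if key not in rank:
--             rank[key] = i
--     keyed = []
--     for j, (k, v) in enumerate(dictionary.items()):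
--         keyed.append((rank.get(k, n + j), k, v))
--     keyed.sort(key=lambda t: t[0])
--     for _, k, v in keyed:
--         yield k, v
-- ===== Notes on version B (the rewrite author's own statement) =====
-- stated objective: alternative
-- what changed: B is decorate-sort-undecorate: it computes a numeric position for every item (first index in key_order via a rank dict, or len(key_order)+its dict position) and stable-sorts the decorated items once, instead of A's two-phase yield-and-delete loop over a mutated dict copy.
import Mathlib
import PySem

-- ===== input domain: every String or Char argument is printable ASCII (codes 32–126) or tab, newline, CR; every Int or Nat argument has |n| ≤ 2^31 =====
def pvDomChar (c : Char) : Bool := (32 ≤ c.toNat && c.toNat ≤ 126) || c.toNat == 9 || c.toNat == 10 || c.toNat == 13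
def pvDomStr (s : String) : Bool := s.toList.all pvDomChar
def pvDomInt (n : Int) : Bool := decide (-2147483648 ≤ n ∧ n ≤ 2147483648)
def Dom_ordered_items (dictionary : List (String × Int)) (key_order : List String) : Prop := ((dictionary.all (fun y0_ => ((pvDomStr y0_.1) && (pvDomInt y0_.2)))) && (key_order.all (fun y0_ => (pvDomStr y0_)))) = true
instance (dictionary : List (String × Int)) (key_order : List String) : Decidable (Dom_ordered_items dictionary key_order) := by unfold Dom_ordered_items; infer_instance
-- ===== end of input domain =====

-- B replaces A's two-phase yield-and-delete loop over a dict copy by decorate-sort-undecorate: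
-- each item gets a numeric position (first index in key_order, else len(key_order)+dict position)
-- and is stable-sorted once (alternative; return value only — both are generators, compared as the list they yield).

-- ===== PORT A =====
-- dict ported as its insertion-ordered items list (unique keys from a Python dict):
-- `key in dict_copy` = first-key scan, `dict_copy[key]` = first match, `del dict_copy[key]`
-- = drop the entries with that key (exact: a dict's keys are unique).
def ordered_items (dictionary : List (String × Int)) (key_order : List String) : List (String × Int) :=
  let st := key_order.foldl (fun (st : List (String × Int) × List (String × Int)) key =>
    if st.1.any (fun kv => kv.1 == key) then
      (st.1.filter (fun kv => !(kv.1 == key)),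
       st.2 ++ [(key, (((st.1.find? (fun kv => kv.1 == key)).map Prod.snd).getD 0))])
    else st) (dictionary, [])
  st.2 ++ st.1

-- ===== PORT B =====
-- rank = {} built with `if key not in rank: rank[key] = i`; keyed = the decorated items;
-- keyed.sort(key=lambda t: t[0]) = PySem.List.sorted (stable); then undecorate.
def ordered_items_alt (dictionary : List (String × Int)) (key_order : List String) : List (String × Int) :=
  let n : Int := key_order.length
  let rank := (PySem.List.enumerate key_order 0).foldl
    (fun (r : PySem.Dict String Int) p => if !(r.contains p.2) then r.insert p.2 p.1 else r)
    PySem.Dict.empty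
  let keyed := (PySem.List.enumerate dictionary 0).foldl
    (fun (acc : List (Int × String × Int)) p => acc ++ [(rank.getD p.2.1 (n + p.1), p.2.1, p.2.2)]) []
  let sortedK := PySem.List.sorted keyed (fun t => t.1)
  sortedK.map (fun t => (t.2.1, t.2.2))

-- ===== PRECONDITION & SPEC =====
-- Pre_ excludes association lists with a duplicated key: such lists cannot arise from a Python
-- dict (the argument's type), and A's first-value/delete-all behaviour on them is an artefact of
-- the association-list model, not of the Python programs.
def Pre_ordered_items (dictionary : List (String × Int)) (key_order : List String) : Prop :=
  (dictionary.map Prod.fst).Nodup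
instance (dictionary : List (String × Int)) (key_order : List String) : Decidable (Pre_ordered_items dictionary key_order) := by unfold Pre_ordered_items; infer_instance

def pvWitness_ordered_items : (List (String × Int)) × List String := ([("a", 1), ("b", 2)], ["b", "c"])

def Spec_ordered_items (dictionary : List (String × Int)) (key_order : List String) (out : List (String × Int)) : Prop := out = ordered_items_alt dictionary key_order
instance (dictionary : List (String × Int)) (key_order : List String) (out : List (String × Int)) : Decidable (Spec_ordered_items dictionary key_order out) := by unfold Spec_ordered_items; infer_instance

-- ===== CLAIM (what is proved, stated in full; the proofs are below) =====
def Claim_equal_ordered_items : Prop := ∀ (dictionary : List (String × Int)) (key_order : List String), Dom_ordered_items dictionary key_order → Pre_ordered_items dictionary key_order → Spec_ordered_items dictionary key_order (ordered_items dictionary key_order)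

-- ===== LEMMAS AND PROOFS =====

-- `dictionary[k]` as A reads it (first match, on the full original list)
def pvLookup (dictionary : List (String × Int)) (k : String) : Int :=
  ((dictionary.find? (fun kv => kv.1 == k)).map Prod.snd).getD 0

-- the triples A yields in its first phase: first occurrences (with their key_order index)
-- of keys present in `dictionary`, avoiding the accumulator `seen`
def pvFrE (dictionary : List (String × Int)) : List String → List (Int × String) → List (Int × String × Int)
  | _, [] => []
  | seen, p :: rest =>
    if dictionary.any (fun kv => kv.1 == p.2) && !(seen.contains p.2) then
      (p.1, p.2, pvLookup dictionary p.2) :: pvFrE dictionary (p.2 :: seen) rest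
    else pvFrE dictionary seen rest

-- the decoration B attaches, written by cases on where the key sits
def pvG (key_order : List String) (p : Int × String × Int) : Int × String × Int :=
  if key_order.contains p.2.1 then ((key_order.idxOf p.2.1 : Int), p.2.1, p.2.2)
  else ((key_order.length : Int) + p.1, p.2.1, p.2.2)

theorem pvAny_filter (dictionary : List (String × Int)) (seen : List String) (k : String) :
    ((dictionary.filter (fun kv => !(seen.contains kv.1))).any (fun kv => kv.1 == k))
      = (dictionary.any (fun kv => kv.1 == k) && !(seen.contains k)) := by
  induction dictionary with
  | nil => simp
  | cons kv t ih =>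
    simp only [List.filter_cons, List.any_cons]
    simp at ih
    by_cases h : kv.1 = k
    · subst h
      by_cases hs : kv.1 ∈ seen
      · simp [hs, ih]
      · simp [hs]
    · have hb : (kv.1 == k) = false := by simp [h]
      by_cases hs : kv.1 ∈ seen <;> simp [hs, hb, ih]

theorem pvFind_filter (dictionary : List (String × Int)) (seen : List String) (k : String)
    (h : seen.contains k = false) :
    (dictionary.filter (fun kv => !(seen.contains kv.1))).find? (fun kv => kv.1 == k)
      = dictionary.find? (fun kv => kv.1 == k) := by
  have h' : k ∉ seen := by simpa using h
  induction dictionary with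
  | nil => simp
  | cons kv t ih =>
    simp only [List.filter_cons]
    simp at ih
    by_cases hk : kv.1 = k
    · subst hk; simp [h', List.find?]
    · have hb : (kv.1 == k) = false := by simp [hk]
      by_cases hs : kv.1 ∈ seen <;> simp [hs, hb, List.find?, ih]

theorem pvFind_of_mem_nodup (dictionary : List (String × Int))
    (hnd : (dictionary.map Prod.fst).Nodup) (k : String) (v : Int)
    (hm : (k, v) ∈ dictionary) :
    dictionary.find? (fun kv => kv.1 == k) = some (k, v) := by
  induction dictionary with
  | nil => simp at hm
  | cons kv t ih =>
    simp only [List.map_cons, List.nodup_cons] at hnd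
    rcases List.mem_cons.mp hm with h | h
    · subst h; simp [List.find?]
    · have hmem : k ∈ t.map Prod.fst := List.mem_map.mpr ⟨(k, v), h, rfl⟩
      have hne : kv.1 ≠ k := fun he => hnd.1 (he ▸ hmem)
      have hb : (kv.1 == k) = false := by simp [hne]
      simp [List.find?, hb, ih hnd.2 h]

theorem pvFrE_sublist (dictionary : List (String × Int)) :
    ∀ (l : List (Int × String)) (seen : List String),
    (pvFrE dictionary seen l).Sublist (l.map (fun p => (p.1, p.2, pvLookup dictionary p.2))) := by
  intro l
  induction l with
  | nil => intro seen; simp [pvFrE]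
  | cons p rest ih =>
    intro seen
    simp only [pvFrE, List.map_cons]
    split_ifs with h
    · exact (ih (p.2 :: seen)).cons₂ _
    · exact (ih seen).cons _

theorem pvFrE_key_not_seen (dictionary : List (String × Int)) :
    ∀ (l : List (Int × String)) (seen : List String) (t : Int × String × Int),
    t ∈ pvFrE dictionary seen l → seen.contains t.2.1 = false := by
  intro l
  induction l with
  | nil => intro seen t ht; simp [pvFrE] at ht
  | cons p rest ih =>
    intro seen t ht
    simp only [pvFrE] at ht
    split_ifs at ht with h
    · rcases List.mem_cons.mp ht with he | hm
      · subst he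
        simp only [Bool.and_eq_true] at h
        simpa using h.2
      · have := ih (p.2 :: seen) t hm
        simp only [List.contains_cons] at this
        simp only [Bool.or_eq_false_iff] at this
        exact this.2
    · exact ih seen t ht

theorem pvFrE_keys_nodup (dictionary : List (String × Int)) :
    ∀ (l : List (Int × String)) (seen : List String),
    ((pvFrE dictionary seen l).map (fun t => t.2.1)).Nodup := by
  intro l
  induction l with
  | nil => intro seen; simp [pvFrE]
  | cons p rest ih =>
    intro seen
    simp only [pvFrE]
    split_ifs with h
    · simp only [List.map_cons, List.nodup_cons]
      refine ⟨?_, ih (p.2 :: seen)⟩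
      intro hmem
      rcases List.mem_map.mp hmem with ⟨t, ht, he⟩
      have := pvFrE_key_not_seen dictionary rest (p.2 :: seen) t ht
      rw [he] at this
      simp at this
    · exact ih seen

theorem pvRank_aux (ko : List String) :
    ∀ (s : Int) (d : PySem.Dict String Int) (k : String),
    ((PySem.List.enumerate ko s).foldl
        (fun (r : PySem.Dict String Int) p => if !(r.contains p.2) then r.insert p.2 p.1 else r) d).get? k
      = if d.contains k then d.get? k
        else if k ∈ ko then some (s + (ko.idxOf k : Int)) else none := by
  induction ko with
  | nil =>
    intro s d k
    simp only [PySem.List.enumerate, List.foldl_nil, List.not_mem_nil, if_false]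
    by_cases h : d.contains k
    · simp [h]
    · have hb : d.contains k = false := by simpa using h
      simp [hb, (PySem.Dict.get?_eq_none_iff_contains d k).mpr hb]
  | cons k0 t ih =>
    intro s d k
    rw [PySem.List.enumerate_cons, List.foldl_cons]
    by_cases hc : d.contains k0
    · have hd : (if !(d.contains k0) then d.insert k0 s else d) = d := by simp [hc]
      rw [hd, ih (s+1) d k]
      by_cases hk : d.contains k
      · simp [hk]
      · have hne : k ≠ k0 := fun he => hk (he ▸ hc)
        have hmem : k ∈ k0 :: t ↔ k ∈ t := by simp [hne]
        have hidx : List.idxOf k (k0 :: t) = (List.idxOf k t).succ := List.idxOf_cons_ne t (Ne.symm hne)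
        by_cases hm : k ∈ t
        · simp only [hk, if_false, hmem.mpr hm, hm, if_pos, hidx]
          congr 1
          simp only [Bool.false_eq_true, if_false, Nat.succ_eq_add_one]
          push_cast
          ring_nf
        · simp [hk, hmem, hm]
    · have hcf : d.contains k0 = false := by simpa using hc
      have hd : (if !(d.contains k0) then d.insert k0 s else d) = d.insert k0 s := by simp [hcf]
      rw [hd, ih (s+1) (d.insert k0 s) k]
      by_cases he : k = k0
      · subst he
        simp [PySem.Dict.contains_insert_self, PySem.Dict.get?_insert_self, hcf]
      · rw [PySem.Dict.contains_insert, PySem.Dict.get?_insert_of_ne d s he]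
        have hb0 : (k == k0) = false := by simpa using he
        rw [hb0]
        simp only [Bool.false_or]
        by_cases hk : d.contains k
        · simp [hk]
        · have hmem : k ∈ k0 :: t ↔ k ∈ t := by simp [he]
          have hidx : List.idxOf k (k0 :: t) = (List.idxOf k t).succ := List.idxOf_cons_ne t (Ne.symm he)
          by_cases hm : k ∈ t
          · simp only [hk, if_false, hmem.mpr hm, hm, if_pos, hidx]
            simp only [Bool.false_eq_true, if_false, Nat.succ_eq_add_one]
            push_cast
            ring_nf
          · simp [hk, hmem, hm]

theorem pvRank_get? (key_order : List String) (k : String) :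
    ((PySem.List.enumerate key_order 0).foldl
        (fun (r : PySem.Dict String Int) p => if !(r.contains p.2) then r.insert p.2 p.1 else r)
        PySem.Dict.empty).get? k
      = if k ∈ key_order then some ((key_order.idxOf k : Int)) else none := by
  rw [pvRank_aux key_order 0 PySem.Dict.empty k]
  simp [PySem.Dict.contains_empty]

theorem pvMain (dictionary : List (String × Int)) (ko : List String) :
    ∀ (s : Int) (seen : List String) (acc : List (String × Int)),
    (let st := ko.foldl (fun (st : List (String × Int) × List (String × Int)) key =>
        if st.1.any (fun kv => kv.1 == key) then
          (st.1.filter (fun kv => !(kv.1 == key)),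
           st.2 ++ [(key, (((st.1.find? (fun kv => kv.1 == key)).map Prod.snd).getD 0))])
        else st) (dictionary.filter (fun kv => !(seen.contains kv.1)), acc)
     st.2 ++ st.1)
    = acc ++ (pvFrE dictionary seen (PySem.List.enumerate ko s)).map (fun t => (t.2.1, t.2.2))
        ++ dictionary.filter (fun kv => !(seen.contains kv.1 || ko.contains kv.1)) := by
  induction ko with
  | nil =>
    intro s seen acc
    simp [pvFrE, PySem.List.enumerate]
  | cons key ko' ih =>
    intro s seen acc
    rw [PySem.List.enumerate_cons]
    simp only [List.foldl_cons, pvFrE]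
    rw [pvAny_filter dictionary seen key]
    cases hg : (dictionary.any (fun kv => kv.1 == key) && !(seen.contains key)) with
    | true =>
      simp only [if_pos]
      have hns : seen.contains key = false := by
        rcases Bool.and_eq_true .. |>.mp hg with ⟨_, h2⟩
        simpa using h2
      rw [pvFind_filter dictionary seen key hns]
      have hff : (dictionary.filter (fun kv => !(seen.contains kv.1))).filter
            (fun kv => !(kv.1 == key))
          = dictionary.filter (fun kv => !((key :: seen).contains kv.1)) := by
        rw [List.filter_filter]
        apply List.filter_congr
        intro kv _
        simp only [List.contains_cons]
        cases h1 : (kv.1 == key) <;> cases h2 : seen.contains kv.1 <;> simp [h1, h2]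
      rw [hff, ih (s+1) (key :: seen) _]
      have htail : dictionary.filter (fun kv => !((key :: seen).contains kv.1 || ko'.contains kv.1))
          = dictionary.filter (fun kv => !(seen.contains kv.1 || (key :: ko').contains kv.1)) := by
        apply List.filter_congr
        intro kv _
        simp only [List.contains_cons]
        cases h1 : (kv.1 == key) <;> cases h2 : seen.contains kv.1 <;>
          cases h3 : ko'.contains kv.1 <;> simp [h1, h2, h3]
      rw [htail]
      simp [pvLookup]
    | false =>
      simp only [Bool.false_eq_true, if_false]
      rw [ih (s+1) seen acc]
      have hb : dictionary.any (fun kv => kv.1 == key) = false ∨ seen.contains key = true := by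
        rcases Bool.and_eq_false_iff.mp hg with h | h
        · exact Or.inl h
        · right; revert h; cases seen.contains key <;> simp
      have htail : dictionary.filter (fun kv => !(seen.contains kv.1 || ko'.contains kv.1))
          = dictionary.filter (fun kv => !(seen.contains kv.1 || (key :: ko').contains kv.1)) := by
        apply List.filter_congr
        intro kv hkv
        simp only [List.contains_cons]
        rcases hb with h | h
        · have : (kv.1 == key) = false := by
            have := List.any_eq_false.mp h kv hkv  -- check name
            simpa using this
          rw [this]
          simp
        · by_cases he : kv.1 = key
          · rw [he, h]; simp
          · have : (kv.1 == key) = false := by simp [he]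
            rw [this]; simp
      rw [htail]

theorem pvMem_pvFrE (dictionary : List (String × Int)) (ko : List String) :
    ∀ (s : Int) (seen : List String) (t : Int × String × Int),
    t ∈ pvFrE dictionary seen (PySem.List.enumerate ko s)
      ↔ (t.2.1 ∈ ko ∧ seen.contains t.2.1 = false
          ∧ dictionary.any (fun kv => kv.1 == t.2.1) = true
          ∧ t = (s + (ko.idxOf t.2.1 : Int), t.2.1, pvLookup dictionary t.2.1)) := by
  induction ko with
  | nil =>
    intro s seen t
    simp [pvFrE, PySem.List.enumerate]
  | cons k0 ko' ih =>
    intro s seen t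
    obtain ⟨a, k, v⟩ := t
    rw [PySem.List.enumerate_cons]
    simp only [pvFrE]
    cases hg : (dictionary.any (fun kv => kv.1 == k0) && !(seen.contains k0)) with
    | true =>
      have hany : dictionary.any (fun kv => kv.1 == k0) = true := (Bool.and_eq_true .. |>.mp hg).1
      have hns : seen.contains k0 = false := by
        have := (Bool.and_eq_true .. |>.mp hg).2; simpa using this
      simp only [if_pos, List.mem_cons, ih (s+1) (k0 :: seen) ⟨a, k, v⟩]
      by_cases he : k = k0
      · subst he
        constructor
        · rintro (heq | ⟨hmem, hcon, _, _⟩)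
          · obtain ⟨h1, h2⟩ := Prod.mk.injEq .. ▸ heq
            refine ⟨Or.inl rfl, hns, hany, ?_⟩
            simp_all [List.idxOf_cons_self]
          · exfalso; simp at hcon
        · rintro ⟨hmem, hcon, hany', heq⟩
          left
          rw [List.idxOf_cons_self] at heq
          simpa using heq
      · have hbk : (k == k0) = false := by simp [he]
        have hidx : List.idxOf k (k0 :: ko') = (List.idxOf k ko').succ :=
          List.idxOf_cons_ne ko' (Ne.symm he)
        constructor
        · rintro (heq | ⟨hmem, hcon, hany', heq⟩)
          · exfalso
            have : k = k0 := congrArg (fun t => t.2.1) heq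
            exact he this
          · simp only [List.contains_cons, hbk, Bool.false_or] at hcon
            refine ⟨Or.inr hmem, hcon, hany', ?_⟩
            rw [hidx]
            simp only [Nat.succ_eq_add_one] at heq ⊢
            push_cast at heq ⊢
            rw [heq]
            simp
            omega
        · rintro ⟨hmem, hcon, hany', heq⟩
          right
          have hmem' : k ∈ ko' := by
            rcases hmem with h | h
            · exact absurd h he
            · exact h
          refine ⟨hmem', ?_, hany', ?_⟩
          · have hnotin : k ∉ seen := by simpa using hcon
            simp [List.contains_cons, he, hnotin]
          · rw [hidx] at heq
            simp only [Nat.succ_eq_add_one] at heq ⊢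
            push_cast at heq ⊢
            rw [heq]
            simp
            omega
    | false =>
      simp only [Bool.false_eq_true, if_false, ih (s+1) seen ⟨a, k, v⟩]
      by_cases he : k = k0
      · subst he
        constructor
        · rintro ⟨hmem, hcon, hany', heq⟩
          exfalso
          have : (dictionary.any (fun kv => kv.1 == k) && !(seen.contains k)) = true := by
            rw [hany', hcon]; rfl
          rw [hg] at this; exact Bool.false_ne_true this
        · rintro ⟨hmem, hcon, hany', heq⟩
          exfalso
          have : (dictionary.any (fun kv => kv.1 == k) && !(seen.contains k)) = true := by
            rw [hany', hcon]; rfl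
          rw [hg] at this; exact Bool.false_ne_true this
      · have hidx : List.idxOf k (k0 :: ko') = (List.idxOf k ko').succ :=
          List.idxOf_cons_ne ko' (Ne.symm he)
        have hmemiff : k ∈ k0 :: ko' ↔ k ∈ ko' := by simp [he]
        constructor
        · rintro ⟨hmem, hcon, hany', heq⟩
          refine ⟨hmemiff.mpr hmem, hcon, hany', ?_⟩
          rw [hidx]
          simp only [Nat.succ_eq_add_one] at heq ⊢
          push_cast at heq ⊢
          rw [heq]; simp; omega
        · rintro ⟨hmem, hcon, hany', heq⟩
          refine ⟨hmemiff.mp hmem, hcon, hany', ?_⟩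
          rw [hidx] at heq
          simp only [Nat.succ_eq_add_one] at heq ⊢
          push_cast at heq ⊢
          rw [heq]; simp; omega

-- A's value, in closed form
theorem pvA_char (dictionary : List (String × Int)) (key_order : List String) :
    ordered_items dictionary key_order
      = (pvFrE dictionary [] (PySem.List.enumerate key_order 0)).map (fun t => (t.2.1, t.2.2))
        ++ dictionary.filter (fun kv => !(key_order.contains kv.1)) := by
  have hfil : dictionary.filter (fun kv => !(([] : List String).contains kv.1)) = dictionary := by
    simp
  have h := pvMain dictionary key_order 0 [] []
  rw [hfil] at h
  have htail : dictionary.filter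
        (fun kv => !(([] : List String).contains kv.1 || key_order.contains kv.1))
      = dictionary.filter (fun kv => !(key_order.contains kv.1)) := by
    apply List.filter_congr
    intro kv _
    simp
  rw [htail, List.nil_append] at h
  exact h

-- B's decorated list is E.map (pvG key_order)
theorem pvKeyed_eq (dictionary : List (String × Int)) (key_order : List String) :
    ((PySem.List.enumerate dictionary 0).foldl
      (fun (acc : List (Int × String × Int)) p =>
        acc ++ [(((PySem.List.enumerate key_order 0).foldl
          (fun (r : PySem.Dict String Int) p => if !(r.contains p.2) then r.insert p.2 p.1 else r)
          PySem.Dict.empty).getD p.2.1 ((key_order.length : Int) + p.1), p.2.1, p.2.2)]) [])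
    = (PySem.List.enumerate dictionary 0).map
        (fun p => pvG key_order (p.1, p.2.1, p.2.2)) := by
  rw [PySem.List.foldl_append_singleton_eq_map, List.nil_append]
  apply List.map_congr_left
  intro p _
  rw [PySem.Dict.getD_eq_get?_getD, pvRank_get? key_order p.2.1]
  by_cases hm : p.2.1 ∈ key_order
  · have hc : key_order.contains p.2.1 = true := List.contains_iff_mem.mpr hm
    simp [pvG, hc, hm]
  · have hc : key_order.contains p.2.1 = false := by simpa using hm
    simp [pvG, hc, hm]

-- A's first-phase yields are a permutation of the decorated key_order-hits
theorem pvFront_perm (dictionary : List (String × Int)) (key_order : List String)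
    (hpre : (dictionary.map Prod.fst).Nodup) :
    (pvFrE dictionary [] (PySem.List.enumerate key_order 0)).Perm
      (((PySem.List.enumerate dictionary 0).filter (fun p => key_order.contains p.2.1)).map
        (fun p => pvG key_order (p.1, p.2.1, p.2.2))) := by
  have hnd1 : (pvFrE dictionary [] (PySem.List.enumerate key_order 0)).Nodup :=
    List.Nodup.of_map _ (pvFrE_keys_nodup dictionary _ [])
  have hkeymap : ((PySem.List.enumerate dictionary 0).map (fun p => p.2.1))
      = dictionary.map Prod.fst := by
    have h2 := PySem.List.map_snd_enumerate dictionary 0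
    rw [show (fun p : Int × (String × Int) => p.2.1)
          = (Prod.fst ∘ fun p : Int × (String × Int) => p.2) from rfl,
        ← List.map_map, h2]
  have hcomp : ((fun (t : Int × String × Int) => t.2.1)
      ∘ (fun p : Int × (String × Int) => pvG key_order (p.1, p.2.1, p.2.2)))
      = fun p : Int × (String × Int) => p.2.1 := by
    funext p
    simp only [Function.comp, pvG]
    split_ifs <;> rfl
  have hnd2 : (((PySem.List.enumerate dictionary 0).filter
      (fun p => key_order.contains p.2.1)).map
        (fun p => pvG key_order (p.1, p.2.1, p.2.2))).Nodup := by
    apply List.Nodup.of_map (fun t : Int × String × Int => t.2.1)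
    rw [List.map_map, hcomp]
    refine List.Sublist.nodup (List.Sublist.map _ List.filter_sublist) ?_
    rw [hkeymap]
    exact hpre
  rw [List.perm_ext_iff_of_nodup hnd1 hnd2]
  intro t
  rw [pvMem_pvFrE dictionary key_order 0 [] t]
  constructor
  · rintro ⟨hmem, -, hany, heq⟩
    rcases List.any_eq_true.mp hany with ⟨kv, hkv, hbeq⟩
    have hk : kv.1 = t.2.1 := by simpa using hbeq
    have hkvm : (t.2.1, kv.2) ∈ dictionary := by rw [← hk]; simpa using hkv
    have hlook : pvLookup dictionary t.2.1 = kv.2 := by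
      simp [pvLookup, pvFind_of_mem_nodup dictionary hpre t.2.1 kv.2 hkvm]
    have hkvE : kv ∈ (PySem.List.enumerate dictionary 0).map (fun p => p.2) := by
      rw [PySem.List.map_snd_enumerate]; exact hkv
    rcases List.mem_map.mp hkvE with ⟨p, hpE, hp2⟩
    have hc : key_order.contains p.2.1 = true := by
      rw [hp2, hk]; exact List.contains_iff_mem.mpr hmem
    refine List.mem_map.mpr ⟨p, List.mem_filter.mpr ⟨hpE, hc⟩, ?_⟩
    have hg : pvG key_order (p.1, p.2.1, p.2.2)
        = ((key_order.idxOf p.2.1 : Int), p.2.1, p.2.2) := by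
      have hm' : p.2.1 ∈ key_order := List.contains_iff_mem.mp hc
      simp [pvG, hc, hm']
    rw [hg, hp2, hk, heq, hlook]
    simp
  · intro ht
    rcases List.mem_map.mp ht with ⟨p, hpf, hgt⟩
    obtain ⟨hpE, hPc⟩ := List.mem_filter.mp hpf
    have hm : p.2.1 ∈ key_order := List.contains_iff_mem.mp hPc
    have hpmem : p.2 ∈ dictionary := by
      rcases (PySem.List.mem_enumerate_iff dictionary 0 p).mp hpE with ⟨k, hk, rfl⟩
      exact List.getElem_mem hk
    have hpmem' : (p.2.1, p.2.2) ∈ dictionary := by simpa using hpmem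
    have hlook : pvLookup dictionary p.2.1 = p.2.2 := by
      simp [pvLookup, pvFind_of_mem_nodup dictionary hpre p.2.1 p.2.2 hpmem']
    have hg : pvG key_order (p.1, p.2.1, p.2.2)
        = ((key_order.idxOf p.2.1 : Int), p.2.1, p.2.2) := by
      simp [pvG, hPc, hm]
    rw [hg] at hgt
    subst hgt
    refine ⟨hm, rfl, ?_, ?_⟩
    · exact List.any_eq_true.mpr ⟨p.2, hpmem, by simp⟩
    · rw [hlook]; simp

-- every position in the first block is below every position in the second
theorem pvTarget_pairwise (dictionary : List (String × Int)) (key_order : List String) :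
    List.Pairwise (fun (a b : Int × String × Int) => a.1 < b.1)
      (pvFrE dictionary [] (PySem.List.enumerate key_order 0)
        ++ ((PySem.List.enumerate dictionary 0).filter
              (fun p => !(key_order.contains p.2.1))).map
            (fun p => pvG key_order (p.1, p.2.1, p.2.2))) := by
  rw [List.pairwise_append]
  refine ⟨?_, ?_, ?_⟩
  · have hsub := pvFrE_sublist dictionary (PySem.List.enumerate key_order 0) []
    have hpw : List.Pairwise (fun (a b : Int × String × Int) => a.1 < b.1)
        ((PySem.List.enumerate key_order 0).map
          (fun p => (p.1, p.2, pvLookup dictionary p.2))) := by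
      refine List.Pairwise.map _ ?_ (PySem.List.pairwise_lt_enumerate key_order 0)
      intro a b h
      exact h
    exact hpw.sublist hsub
  · rw [List.pairwise_map]
    refine List.Pairwise.imp_of_mem ?_
      ((PySem.List.pairwise_lt_enumerate dictionary 0).filter _)
    intro a b ha hb hab
    have hca : key_order.contains a.2.1 = false := by
      have := (List.mem_filter.mp ha).2
      simpa using this
    have hcb : key_order.contains b.2.1 = false := by
      have := (List.mem_filter.mp hb).2
      simpa using this
    simp only [pvG, hca, hcb, Bool.false_eq_true, if_false]
    omega
  · intro a ha b hb
    obtain ⟨hmem, -, -, heq⟩ := (pvMem_pvFrE dictionary key_order 0 [] a).mp ha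
    have ha1 : a.1 = (key_order.idxOf a.2.1 : Int) := by rw [heq]; simp
    have hlt : key_order.idxOf a.2.1 < key_order.length := List.idxOf_lt_length_of_mem hmem
    rcases List.mem_map.mp hb with ⟨p, hpf, rfl⟩
    obtain ⟨hpE, hPc⟩ := List.mem_filter.mp hpf
    have hc : key_order.contains p.2.1 = false := by simpa using hPc
    have hp1 : 0 ≤ p.1 := by
      rcases (PySem.List.mem_enumerate_iff dictionary 0 p).mp hpE with ⟨k, hk, rfl⟩
      simp
    simp only [pvG, hc, Bool.false_eq_true, if_false]
    rw [ha1]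
    have hcast : (key_order.idxOf a.2.1 : Int) < (key_order.length : Int) := by
      exact_mod_cast hlt
    omega

-- the sorted decorated list, named: A's yields, decorated
theorem pvSorted_eq (dictionary : List (String × Int)) (key_order : List String)
    (hpre : (dictionary.map Prod.fst).Nodup) :
    PySem.List.sorted ((PySem.List.enumerate dictionary 0).map
        (fun p => pvG key_order (p.1, p.2.1, p.2.2))) (fun t => t.1)
      = pvFrE dictionary [] (PySem.List.enumerate key_order 0)
        ++ ((PySem.List.enumerate dictionary 0).filter
              (fun p => !(key_order.contains p.2.1))).map
            (fun p => pvG key_order (p.1, p.2.1, p.2.2)) := by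
  apply PySem.List.sorted_eq_of_perm_of_pairwise_lt
  · exact ((pvFront_perm dictionary key_order hpre).append (List.Perm.refl _)).trans
      (by
        have hpart := List.filter_append_perm
          (fun p : Int × (String × Int) => key_order.contains p.2.1)
          (PySem.List.enumerate dictionary 0)
        have := hpart.map (fun p => pvG key_order (p.1, p.2.1, p.2.2))
        rw [List.map_append] at this
        exact this)
  · exact pvTarget_pairwise dictionary key_order

-- ===== VERDICT (by name: the statement is the Claim_ definition above) =====
theorem ordered_items_spec : Claim_equal_ordered_items := by
  intro dictionary key_order _ hpre
  unfold Spec_ordered_items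
  have hB : ordered_items_alt dictionary key_order
      = (PySem.List.sorted ((PySem.List.enumerate dictionary 0).map
          (fun p => pvG key_order (p.1, p.2.1, p.2.2))) (fun t => t.1)).map
        (fun t => (t.2.1, t.2.2)) := by
    simp only [ordered_items_alt]
    rw [pvKeyed_eq dictionary key_order]
  rw [hB, pvSorted_eq dictionary key_order hpre, List.map_append, pvA_char dictionary key_order]
  congr 1
  rw [List.map_map]
  have hcomp : ((fun (t : Int × String × Int) => (t.2.1, t.2.2))
      ∘ (fun p : Int × (String × Int) => pvG key_order (p.1, p.2.1, p.2.2)))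
      = fun p : Int × (String × Int) => p.2 := by
    funext p
    simp only [Function.comp, pvG]
    split_ifs <;> rfl
  rw [hcomp]
  have := List.filter_map
    (f := fun p : Int × (String × Int) => p.2)
    (p := fun kv : String × Int => !(key_order.contains kv.1))
    (l := PySem.List.enumerate dictionary 0)
  rw [PySem.List.map_snd_enumerate] at this
  exact this
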